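-- pv_equiv track=rewrite | github.com/Joeavaib/Skripts | apps/api/app/threads/service.py | _vip_hit
-- ===== SOURCE A (Python) =====
-- def _extract_domain(email: str) -> str | None:
--     if "@" not in email:
--         return None
--     return email.rsplit("@", 1)[-1].strip().lower()
--
-- def _vip_hit(emails: list[str], vip_list: set[str]) -> bool:
--     if not emails or not vip_list:
--         return False
--
--     email_set = set(emails)
--     domain_set = {domain for domain in (_extract_domain(email) for email in emails) if domain}
--
--     for candidate in vip_list:
--         normalized = candidate.lower().strip()
--         if not normalized:
--             continue
--         if "@" in normalized:
--             if normalized in email_set: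
--                 return True
--             continue
--
--         if normalized.startswith("@"):
--             normalized = normalized[1:]
--
--         if normalized in domain_set:
--             return True
--
--     return False
-- ===== SOURCE B (Python) =====
-- def _extract_domain(email: str) -> str | None:
--     if "@" not in email:
--         return None
--     return email.rsplit("@", 1)[-1].strip().lower()
--
-- def _vip_hit(emails: list[str], vip_list: set[str]) -> bool:
--     # Index the VIP side once, then a single any() over emails.
--     vip_emails = set()
--     vip_domains = set()
--     for candidate in vip_list:
--         normalized = candidate.lower().strip()
--         if not normalized:
--             continue
--         if "@" in normalized:
--             vip_emails.add(normalized)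
--         else:
--             vip_domains.add(normalized)
--     return any(
--         email in vip_emails or _extract_domain(email) in vip_domains
--         for email in emails
--     )
-- ===== Notes on version B (the rewrite author's own statement) =====
-- stated objective: idiomatic
-- what changed: B inverts the decomposition: it pre-splits the VIP list once into normalized vip_emails/vip_domains sets and then answers with a single any() pass over emails, instead of A's building email/domain sets from emails and looping over the VIPs; A's dead startswith('@') branch and redundant emptiness guard are dropped.
import Mathlib
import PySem

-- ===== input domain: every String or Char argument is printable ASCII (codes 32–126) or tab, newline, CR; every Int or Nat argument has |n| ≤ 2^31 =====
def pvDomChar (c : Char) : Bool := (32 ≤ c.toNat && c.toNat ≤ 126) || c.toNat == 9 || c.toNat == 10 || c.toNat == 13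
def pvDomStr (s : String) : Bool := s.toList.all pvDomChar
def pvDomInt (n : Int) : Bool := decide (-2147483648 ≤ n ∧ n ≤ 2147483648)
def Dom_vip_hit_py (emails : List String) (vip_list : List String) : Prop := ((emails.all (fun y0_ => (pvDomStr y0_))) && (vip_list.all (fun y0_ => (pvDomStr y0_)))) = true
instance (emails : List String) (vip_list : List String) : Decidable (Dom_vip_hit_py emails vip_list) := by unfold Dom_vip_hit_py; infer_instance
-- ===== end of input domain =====

-- B inverts A's decomposition (indexes the VIP side once, single pass over emails); return value proved equal.

-- ===== PORT A =====
-- _extract_domain: email.rsplit("@", 1)[-1] with "@" present = the characters after the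
-- LAST '@' (hand-ported via reverse/takeWhile; exact since the guard ensures '@' ∈ email).
def pvExtractDomain (email : String) : Option String :=
  if PySem.Str.isIn "@" email = false then none
  else some (PySem.Str.lower (PySem.Str.strip
    (String.mk ((email.toList.reverse.takeWhile (fun c => c ≠ '@')).reverse))))

def pvALoop (email_set : PySem.Set String) (domain_set : PySem.Set String) :
    List String → Bool
  | [] => false
  | candidate :: rest =>
    let normalized := PySem.Str.strip (PySem.Str.lower candidate)
    if normalized = "" then pvALoop email_set domain_set rest
    else if PySem.Str.isIn "@" normalized then
      if PySem.Set.contains email_set normalized then true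
      else pvALoop email_set domain_set rest
    else
      -- normalized[1:] ported as drop 1 (exact for a nonnegative index)
      let normalized' := if PySem.Str.startswith normalized "@"
        then String.mk (normalized.toList.drop 1) else normalized
      if PySem.Set.contains domain_set normalized' then true
      else pvALoop email_set domain_set rest

def vip_hit_py (emails : List String) (vip_list : List String) : Bool :=
  if emails.isEmpty || vip_list.isEmpty then false
  else
    let email_set := PySem.Set.ofList emails
    let domain_set := PySem.Set.ofList
      ((emails.filterMap pvExtractDomain).filter (fun d => d ≠ ""))
    pvALoop email_set domain_set vip_list

-- ===== PORT B =====
def pvBIndex : List String → PySem.Set String × PySem.Set String → PySem.Set String × PySem.Set String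
  | [], p => p
  | candidate :: rest, p =>
    let normalized := PySem.Str.strip (PySem.Str.lower candidate)
    if normalized = "" then pvBIndex rest p
    else if PySem.Str.isIn "@" normalized then
      pvBIndex rest (PySem.Set.add p.1 normalized, p.2)
    else
      pvBIndex rest (p.1, PySem.Set.add p.2 normalized)

def vip_hit_py_alt (emails : List String) (vip_list : List String) : Bool :=
  let vs := pvBIndex vip_list (PySem.Set.empty, PySem.Set.empty)
  emails.any (fun email =>
    PySem.Set.contains vs.1 email ||
    (match pvExtractDomain email with
     | none => false                      -- None in vip_domains (a set of str) is False
     | some d => PySem.Set.contains vs.2 d))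

-- ===== PRECONDITION & SPEC =====
def Spec_vip_hit_py (emails : List String) (vip_list : List String) (out : Bool) : Prop := out = vip_hit_py_alt emails vip_list
instance (emails : List String) (vip_list : List String) (out : Bool) : Decidable (Spec_vip_hit_py emails vip_list out) := by unfold Spec_vip_hit_py; infer_instance

-- ===== CLAIM (what is proved, stated in full; the proofs are below) =====
def Claim_equal_vip_hit_py : Prop := ∀ (emails : List String) (vip_list : List String), Dom_vip_hit_py emails vip_list → Spec_vip_hit_py emails vip_list (vip_hit_py emails vip_list)

-- ===== LEMMAS AND PROOFS =====

-- shared normalization of a VIP candidate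
def pvNorm (c : String) : String := PySem.Str.strip (PySem.Str.lower c)

-- A's per-candidate test, as a named predicate
def pvAF (es ds : PySem.Set String) (c : String) : Bool :=
  !(pvNorm c = "") &&
    (if PySem.Str.isIn "@" (pvNorm c) then PySem.Set.contains es (pvNorm c)
     else PySem.Set.contains ds
       (if PySem.Str.startswith (pvNorm c) "@"
        then String.mk ((pvNorm c).toList.drop 1) else pvNorm c))

-- B's per-email test, as a named predicate
def pvBF (vs : PySem.Set String × PySem.Set String) (e : String) : Bool :=
  PySem.Set.contains vs.1 e ||
    (match pvExtractDomain e with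
     | none => false
     | some d => PySem.Set.contains vs.2 d)

-- the match relation: candidate c (normalized to n) hits email e
def pvR (c e : String) : Prop :=
  pvNorm c ≠ "" ∧
    ((PySem.Str.isIn "@" (pvNorm c) = true ∧ e = pvNorm c) ∨
     (PySem.Str.isIn "@" (pvNorm c) = false ∧ pvExtractDomain e = some (pvNorm c)))

theorem pvStartswith_at (n : String) (h : PySem.Str.isIn "@" n = false) :
    PySem.Str.startswith n "@" = false := by
  by_contra hc
  rw [Bool.not_eq_false, PySem.Str.startswith_eq, PySem.Chars.startswith_iff] at hc
  rw [PySem.Str.isIn_eq, PySem.Chars.isIn_eq_false_iff] at h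
  exact h hc.isInfix

theorem pvALoop_eq_any (es ds : PySem.Set String) (l : List String) :
    pvALoop es ds l = l.any (pvAF es ds) := by
  induction l with
  | nil => simp [pvALoop]
  | cons c rest ih =>
    simp only [pvALoop, List.any_cons]
    by_cases h1 : PySem.Str.strip (PySem.Str.lower c) = ""
    · rw [if_pos h1, ih]
      have hf : pvAF es ds c = false := by
        unfold pvAF pvNorm; rw [decide_eq_true h1]; simp
      rw [hf, Bool.false_or]
    · rw [if_neg h1]
      by_cases h2 : PySem.Str.isIn "@" (PySem.Str.strip (PySem.Str.lower c)) = true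
      · rw [if_pos h2]
        by_cases h3 : PySem.Set.contains es (PySem.Str.strip (PySem.Str.lower c)) = true
        · rw [if_pos h3]
          have hf : pvAF es ds c = true := by
            unfold pvAF pvNorm
            rw [if_pos h2, decide_eq_false h1]
            simpa using h3
          rw [hf, Bool.true_or]
        · rw [if_neg h3, ih]
          have hf : pvAF es ds c = false := by
            unfold pvAF pvNorm
            rw [if_pos h2, decide_eq_false h1]
            simpa using h3
          rw [hf, Bool.false_or]
      · rw [if_neg h2]
        by_cases h5 : PySem.Set.contains ds
            (if PySem.Str.startswith (PySem.Str.strip (PySem.Str.lower c)) "@"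
             then String.mk ((PySem.Str.strip (PySem.Str.lower c)).toList.drop 1)
             else PySem.Str.strip (PySem.Str.lower c)) = true
        · rw [if_pos h5]
          have hf : pvAF es ds c = true := by
            unfold pvAF pvNorm
            rw [if_neg h2, decide_eq_false h1]
            simpa using h5
          rw [hf, Bool.true_or]
        · rw [if_neg h5, ih]
          have hf : pvAF es ds c = false := by
            unfold pvAF pvNorm
            rw [if_neg h2, decide_eq_false h1]
            simpa using h5
          rw [hf, Bool.false_or]

theorem pvBIndex_fst_mem (l : List String)
    (p : PySem.Set String × PySem.Set String) (x : String) :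
    x ∈ (pvBIndex l p).1 ↔ x ∈ p.1 ∨
      ∃ c ∈ l, PySem.Str.strip (PySem.Str.lower c) = x ∧ x ≠ "" ∧
        PySem.Str.isIn "@" x = true := by
  induction l generalizing p with
  | nil => simp [pvBIndex]
  | cons c rest ih =>
    simp only [pvBIndex, List.exists_mem_cons_iff]
    split_ifs with h1 h2
    · rw [ih]
      constructor
      · rintro (h | h)
        · exact Or.inl h
        · exact Or.inr (Or.inr h)
      · rintro (h | ⟨hn, hne, -⟩ | h)
        · exact Or.inl h
        · exact (hne (hn ▸ h1)).elim
        · exact Or.inr h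
    · rw [ih]
      simp only [PySem.Set.mem_add]
      constructor
      · rintro ((h | rfl) | h)
        · exact Or.inl h
        · exact Or.inr (Or.inl ⟨rfl, h1, h2⟩)
        · exact Or.inr (Or.inr h)
      · rintro (h | ⟨hn, -, -⟩ | h)
        · exact Or.inl (Or.inl h)
        · exact Or.inl (Or.inr hn.symm)
        · exact Or.inr h
    · rw [ih]
      constructor
      · rintro (h | h)
        · exact Or.inl h
        · exact Or.inr (Or.inr h)
      · rintro (h | ⟨hn, -, hat⟩ | h)
        · exact Or.inl h
        · exact (h2 (hn ▸ hat)).elim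
        · exact Or.inr h

theorem pvBIndex_snd_mem (l : List String)
    (p : PySem.Set String × PySem.Set String) (x : String) :
    x ∈ (pvBIndex l p).2 ↔ x ∈ p.2 ∨
      ∃ c ∈ l, PySem.Str.strip (PySem.Str.lower c) = x ∧ x ≠ "" ∧
        PySem.Str.isIn "@" x = false := by
  induction l generalizing p with
  | nil => simp [pvBIndex]
  | cons c rest ih =>
    simp only [pvBIndex, List.exists_mem_cons_iff]
    split_ifs with h1 h2
    · rw [ih]
      constructor
      · rintro (h | h)
        · exact Or.inl h
        · exact Or.inr (Or.inr h)
      · rintro (h | ⟨hn, hne, -⟩ | h)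
        · exact Or.inl h
        · exact (hne (hn ▸ h1)).elim
        · exact Or.inr h
    · rw [ih]
      constructor
      · rintro (h | h)
        · exact Or.inl h
        · exact Or.inr (Or.inr h)
      · rintro (h | ⟨hn, -, hat⟩ | h)
        · exact Or.inl h
        · exact absurd (hn ▸ h2) (by rw [hat]; exact Bool.false_ne_true)
        · exact Or.inr h
    · rw [ih]
      simp only [PySem.Set.mem_add]
      constructor
      · rintro ((h | rfl) | h)
        · exact Or.inl h
        · exact Or.inr (Or.inl ⟨rfl, h1, Bool.eq_false_iff.mpr (fun ht => h2 ht)⟩)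
        · exact Or.inr (Or.inr h)
      · rintro (h | ⟨hn, -, -⟩ | h)
        · exact Or.inl (Or.inl h)
        · exact Or.inl (Or.inr hn.symm)
        · exact Or.inr h

-- A's per-candidate test hits iff some email matches it
theorem pvA_candidate_iff (emails : List String) (c : String) :
    pvAF (PySem.Set.ofList emails)
      (PySem.Set.ofList ((emails.filterMap pvExtractDomain).filter (fun d => d ≠ "")))
      c = true ↔ ∃ e ∈ emails, pvR c e := by
  unfold pvAF
  by_cases h0 : pvNorm c = ""
  · simp [h0, pvR]
  by_cases h1 : PySem.Str.isIn "@" (pvNorm c) = true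
  · rw [if_pos h1]
    simp only [h0, decide_false, Bool.not_false, Bool.true_and,
      PySem.Set.contains_iff, PySem.Set.mem_ofList, pvR]
    constructor
    · intro hm; exact ⟨_, hm, h0, Or.inl ⟨h1, rfl⟩⟩
    · rintro ⟨e, he, -, (⟨-, rfl⟩ | ⟨hf, -⟩)⟩
      · exact he
      · rw [h1] at hf; cases hf
  · rw [Bool.not_eq_true] at h1
    rw [if_neg (by rw [h1]; simp), pvStartswith_at _ h1, if_neg (by simp)]
    simp only [h0, decide_false, Bool.not_false, Bool.true_and,
      PySem.Set.contains_iff, PySem.Set.mem_ofList, List.mem_filter,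
      List.mem_filterMap, pvR]
    constructor
    · rintro ⟨⟨e, he, hd⟩, -⟩; exact ⟨e, he, h0, Or.inr ⟨h1, hd⟩⟩
    · rintro ⟨e, he, -, (⟨hf, -⟩ | ⟨-, hd⟩)⟩
      · rw [h1] at hf; cases hf
      · exact ⟨⟨e, he, hd⟩, by simpa using h0⟩

-- B's per-email test hits iff some candidate matches it
theorem pvB_email_iff (vip_list : List String) (e : String) :
    pvBF (pvBIndex vip_list (PySem.Set.empty, PySem.Set.empty)) e = true ↔
    ∃ c ∈ vip_list, pvR c e := by
  unfold pvBF pvR pvNorm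
  rw [Bool.or_eq_true, PySem.Set.contains_iff, pvBIndex_fst_mem]
  constructor
  · rintro (h | h)
    · rcases h with h | ⟨c, hc, hn, hne, hat⟩
      · simp [PySem.Set.empty] at h
      · exact ⟨c, hc, by rw [hn]; exact hne, Or.inl ⟨by rw [hn]; exact hat, hn.symm⟩⟩
    · rcases hh : pvExtractDomain e with _ | d <;> rw [hh] at h
      · cases h
      · rw [PySem.Set.contains_iff, pvBIndex_snd_mem] at h
        rcases h with h | ⟨c, hc, hn, hne, hat⟩
        · simp [PySem.Set.empty] at h
        · exact ⟨c, hc, by rw [hn]; exact hne,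
            Or.inr ⟨by rw [hn]; exact hat, by simp [hn]⟩⟩
  · rintro ⟨c, hc, hne, (⟨hat, rfl⟩ | ⟨hat, hd⟩)⟩
    · exact Or.inl (Or.inr ⟨c, hc, rfl, hne, hat⟩)
    · rw [hd]
      refine Or.inr ?_
      rw [PySem.Set.contains_iff, pvBIndex_snd_mem]
      exact Or.inr ⟨c, hc, rfl, hne, hat⟩

theorem pvAlt_eq (emails vip_list : List String) :
    vip_hit_py_alt emails vip_list =
      emails.any (pvBF (pvBIndex vip_list (PySem.Set.empty, PySem.Set.empty))) := rfl

-- ===== VERDICT (by name: the statement is the Claim_ definition above) =====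
theorem vip_hit_py_spec : Claim_equal_vip_hit_py := by
  intro emails vip_list _
  unfold Spec_vip_hit_py
  rw [pvAlt_eq]
  unfold vip_hit_py
  by_cases he : emails = []
  · subst he; simp
  by_cases hv : vip_list = []
  · subst hv
    rw [if_pos (by simp)]
    symm
    rw [List.any_eq_false]
    intro e _
    intro hb
    rcases (pvB_email_iff [] e).mp hb with ⟨c, hc, -⟩
    cases hc
  · rw [if_neg (by simp [he, hv]), pvALoop_eq_any, Bool.eq_iff_iff,
      List.any_eq_true, List.any_eq_true]
    constructor
    · rintro ⟨c, hc, hf⟩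
      rcases (pvA_candidate_iff emails c).mp hf with ⟨e, he', hr⟩
      exact ⟨e, he', (pvB_email_iff vip_list e).mpr ⟨c, hc, hr⟩⟩
    · rintro ⟨e, he', hg⟩
      rcases (pvB_email_iff vip_list e).mp hg with ⟨c, hc, hr⟩
      exact ⟨c, hc, (pvA_candidate_iff emails c).mpr ⟨e, he', hr⟩⟩
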